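-- pv_equiv track=rewrite | github.com/VolodiaKraplich/.dotsfiles | user/.config/helix/format_toml.py | process_config_toml
-- ===== SOURCE A (Python) =====
-- from collections import OrderedDict
-- from typing import Dict, List, Optional
--
-- def is_keybinding_block(block: str) -> bool:
--     """
--     Check if a TOML block contains key bindings.
--
--     Args:
--         block: A TOML block string
--
--     Returns:
--         bool: True if the block contains key bindings
--     """
--     header = block.splitlines()[0]
--     return header.startswith('[keys.') or header == '[keys]'
--
-- def process_config_toml(blocks: List[str]) -> str:
--     """Process config.toml specific formatting"""
--     unsectioned = []
--     editor_configs = OrderedDict()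
--     theme_configs = OrderedDict()
--     keybindings = []
--
--     last_section = None
--
--     for block in blocks:
--         header = block.splitlines()[0]
--
--         if is_keybinding_block(block):
--             keybindings.append(block)
--             last_section = None
--         elif header.startswith('[theme') or header.startswith('[statusline') or header.startswith('[editor.statusline'):
--             name = header[1:-1]  # Remove [ and ]
--             theme_configs[name] = block
--             last_section = "theme"
--         elif header.startswith('[editor.'):
--             name = header[1:-1]  # Remove [ and ]
--             editor_configs[name] = block
--             last_section = "editor"
--         elif header.startswith('[editor]'):
--             name = "editor"
--             editor_configs[name] = block
--             last_section = "editor"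
--         else:
--             unsectioned.append(block)
--             last_section = None
--
--     output_parts = []
--
--     # Add unsectioned blocks first
--     if unsectioned:
--         output_parts.append("\n\n".join(unsectioned))
--
--     # Add editor section with sorted blocks
--     if editor_configs:
--         if output_parts:
--             output_parts.append("")
--         output_parts.append(
--             "# =============================================================================\n"
--             "# Editor Configuration\n"
--             "# =============================================================================\n"
--         )
--         sorted_editor = [editor_configs[key] for key in sorted(editor_configs.keys())]
--         output_parts.append("\n\n".join(sorted_editor))
--
--     # Add theme section with sorted blocks
--     if theme_configs:
--         if output_parts:
--             output_parts.append("")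
--         output_parts.append(
--             "# =============================================================================\n"
--             "# Theme & UI\n"
--             "# =============================================================================\n"
--         )
--         sorted_theme = [theme_configs[key] for key in sorted(theme_configs.keys())]
--         output_parts.append("\n\n".join(sorted_theme))
--
--     # Add keybindings in original order
--     if keybindings:
--         if output_parts:
--             output_parts.append("")
--         output_parts.append(
--             "# =============================================================================\n"
--             "# Key Bindings\n"
--             "# =============================================================================\n"
--         )
--         output_parts.append("\n\n".join(keybindings))
--
--     return "\n".join(output_parts) + "\n"
-- ===== SOURCE B (Python) =====
-- def _banner(title):
--     line = "# " + "=" * 77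
--     return line + "\n# " + title + "\n" + line + "\n"
--
-- def _kind(block):
--     h = block.splitlines()[0]
--     if h.startswith('[keys.') or h == '[keys]':
--         return 'keys'
--     if h.startswith('[theme') or h.startswith('[statusline') or h.startswith('[editor.statusline'):
--         return 'theme'
--     if h.startswith('[editor.') or h.startswith('[editor]'):
--         return 'editor'
--     return 'plain'
--
-- def _name(block):
--     h = block.splitlines()[0]
--     return 'editor' if h.startswith('[editor]') else h[1:-1]
--
-- def _render(title, blks):
--     """A section rendered as one string, or None if it has no blocks."""
--     if not blks:
--         return None
--     body = "\n\n".join(blks)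
--     return body if title is None else _banner(title) + "\n" + body
--
-- def process_config_toml(blocks):
--     """Process config.toml specific formatting"""
--     editor = {_name(b): b for b in blocks if _kind(b) == 'editor'}
--     theme = {_name(b): b for b in blocks if _kind(b) == 'theme'}
--     sections = [
--         _render(None, [b for b in blocks if _kind(b) == 'plain']),
--         _render('Editor Configuration', [editor[k] for k in sorted(editor)]),
--         _render('Theme & UI', [theme[k] for k in sorted(theme)]),
--         _render('Key Bindings', [b for b in blocks if _kind(b) == 'keys']),
--     ]
--     return "\n\n".join(s for s in sections if s is not None) + "\n"
-- ===== Notes on version B (the rewrite author's own statement) =====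
-- stated objective: simpler
-- what changed: Instead of A's single shared-state loop filling four containers and an incremental output_parts assembly that interleaves "" separators and banner blocks with parts-emptiness checks, B makes one independent filter/dict-comprehension pass per section, renders each section to one standalone string (banner + body), and produces the result as a closed-form '\n\n'.join of the non-empty rendered sections.
import Mathlib
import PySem

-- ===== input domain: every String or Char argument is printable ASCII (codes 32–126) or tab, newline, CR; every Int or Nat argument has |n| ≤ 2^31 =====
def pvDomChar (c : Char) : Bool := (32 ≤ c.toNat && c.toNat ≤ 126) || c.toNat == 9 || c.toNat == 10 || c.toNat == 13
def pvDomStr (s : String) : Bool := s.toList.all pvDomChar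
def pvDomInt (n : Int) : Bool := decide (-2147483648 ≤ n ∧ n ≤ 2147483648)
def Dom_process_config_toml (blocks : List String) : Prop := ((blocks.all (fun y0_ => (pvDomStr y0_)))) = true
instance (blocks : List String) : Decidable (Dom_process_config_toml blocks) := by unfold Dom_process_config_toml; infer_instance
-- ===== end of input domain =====

-- B replaces A's one shared-state classification loop and incremental parts/"" assembly by
-- staged filter passes (one per section) and a closed-form "\n\n"-join of rendered sections.

-- ===== PORT A =====
def pv_is_keybinding_block (block : String) : Bool :=
  let header := PySem.List.pyGetD (PySem.Str.splitlines block) 0 ""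
  PySem.Str.startswith header "[keys." || header == "[keys]"

def pvStateA := List String × PySem.Dict String String × PySem.Dict String String × List String × Option String

def pvStepA (st : pvStateA) (block : String) : pvStateA :=
  let header := PySem.List.pyGetD (PySem.Str.splitlines block) 0 ""
  match st with
  | (unsectioned, editor_configs, theme_configs, keybindings, _last) =>
    if pv_is_keybinding_block block then
      (unsectioned, editor_configs, theme_configs, keybindings ++ [block], none)
    else if PySem.Str.startswith header "[theme" || PySem.Str.startswith header "[statusline"
          || PySem.Str.startswith header "[editor.statusline" then
      let name := PySem.Str.slice header (some 1) (some (-1))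
      (unsectioned, editor_configs, theme_configs.insert name block, keybindings, some "theme")
    else if PySem.Str.startswith header "[editor." then
      let name := PySem.Str.slice header (some 1) (some (-1))
      (unsectioned, editor_configs.insert name block, theme_configs, keybindings, some "editor")
    else if PySem.Str.startswith header "[editor]" then
      (unsectioned, editor_configs.insert "editor" block, theme_configs, keybindings, some "editor")
    else
      (unsectioned ++ [block], editor_configs, theme_configs, keybindings, none)

def pvBannerEditorA : String :=
  "# =============================================================================\n# Editor Configuration\n# =============================================================================\n"
def pvBannerThemeA : String :=
  "# =============================================================================\n# Theme & UI\n# =============================================================================\n"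
def pvBannerKeysA : String :=
  "# =============================================================================\n# Key Bindings\n# =============================================================================\n"

def process_config_toml (blocks : List String) : String :=
  match blocks.foldl pvStepA ([], PySem.Dict.empty, PySem.Dict.empty, [], none) with
  | (unsectioned, editor_configs, theme_configs, keybindings, _last) =>
    let parts : List String :=
      if unsectioned.isEmpty then [] else [PySem.Str.join "\n\n" unsectioned]
    let parts :=
      if editor_configs.items.isEmpty then parts else
        (if parts.isEmpty then parts else parts ++ [""]) ++
        [pvBannerEditorA,
         PySem.Str.join "\n\n" ((PySem.List.sorted editor_configs.keys (fun x => x) false).map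
           (fun key => editor_configs.getD key ""))]
    let parts :=
      if theme_configs.items.isEmpty then parts else
        (if parts.isEmpty then parts else parts ++ [""]) ++
        [pvBannerThemeA,
         PySem.Str.join "\n\n" ((PySem.List.sorted theme_configs.keys (fun x => x) false).map
           (fun key => theme_configs.getD key ""))]
    let parts :=
      if keybindings.isEmpty then parts else
        (if parts.isEmpty then parts else parts ++ [""]) ++
        [pvBannerKeysA, PySem.Str.join "\n\n" keybindings]
    PySem.Str.join "\n" parts ++ "\n"

-- ===== PORT B =====
def pvBanner (title : String) : String :=
  let line := "# " ++ String.ofList (List.replicate 77 '=')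
  line ++ "\n# " ++ title ++ "\n" ++ line ++ "\n"

def pvKindB (block : String) : String :=
  let h := PySem.List.pyGetD (PySem.Str.splitlines block) 0 ""
  if PySem.Str.startswith h "[keys." || h == "[keys]" then "keys"
  else if PySem.Str.startswith h "[theme" || PySem.Str.startswith h "[statusline"
        || PySem.Str.startswith h "[editor.statusline" then "theme"
  else if PySem.Str.startswith h "[editor." || PySem.Str.startswith h "[editor]" then "editor"
  else "plain"

def pvNameB (block : String) : String :=
  let h := PySem.List.pyGetD (PySem.Str.splitlines block) 0 ""
  if PySem.Str.startswith h "[editor]" then "editor"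
  else PySem.Str.slice h (some 1) (some (-1))

def pvRenderB (title : Option String) (blks : List String) : Option String :=
  if blks.isEmpty then none
  else
    let body := PySem.Str.join "\n\n" blks
    match title with
    | none => some body
    | some t => some (pvBanner t ++ "\n" ++ body)

def process_config_toml_alt (blocks : List String) : String :=
  let editor : PySem.Dict String String :=
    (blocks.filter (fun b => pvKindB b == "editor")).foldl
      (fun d b => d.insert (pvNameB b) b) PySem.Dict.empty
  let theme : PySem.Dict String String :=
    (blocks.filter (fun b => pvKindB b == "theme")).foldl
      (fun d b => d.insert (pvNameB b) b) PySem.Dict.empty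
  let sections : List (Option String) :=
    [ pvRenderB none (blocks.filter (fun b => pvKindB b == "plain")),
      pvRenderB (some "Editor Configuration")
        ((PySem.List.sorted editor.keys (fun x => x) false).map (fun k => editor.getD k "")),
      pvRenderB (some "Theme & UI")
        ((PySem.List.sorted theme.keys (fun x => x) false).map (fun k => theme.getD k "")),
      pvRenderB (some "Key Bindings") (blocks.filter (fun b => pvKindB b == "keys")) ]
  PySem.Str.join "\n\n" (sections.filterMap id) ++ "\n"

-- ===== PRECONDITION & SPEC =====
-- Pre_ excludes blocks containing the empty string: there A raises IndexError on block.splitlines()[0].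
def Pre_process_config_toml (blocks : List String) : Prop := (blocks.all (fun b => b ≠ "")) = true
instance (blocks : List String) : Decidable (Pre_process_config_toml blocks) := by
  unfold Pre_process_config_toml; infer_instance
def pvWitness_process_config_toml : List String := ["[editor]", "x = 1", "[keys]"]

def Spec_process_config_toml (blocks : List String) (out : String) : Prop := out = process_config_toml_alt blocks
instance (blocks : List String) (out : String) : Decidable (Spec_process_config_toml blocks out) := by unfold Spec_process_config_toml; infer_instance

-- ===== CLAIM (what is proved, stated in full; the proofs are below) =====
def Claim_equal_process_config_toml : Prop := ∀ (blocks : List String), Dom_process_config_toml blocks → Pre_process_config_toml blocks → Spec_process_config_toml blocks (process_config_toml blocks)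

-- ===== LEMMAS AND PROOFS =====

-- if p is a prefix of l and p,q are incompatible (neither a prefix of the other), q is not a prefix of l
theorem pv_chars_excl (l p q : List Char)
    (hp : PySem.Chars.startswith l p = true)
    (hpq : ¬ (p <+: q)) (hqp : ¬ (q <+: p)) :
    PySem.Chars.startswith l q = false := by
  have hp' : p <+: l := by
    simpa [PySem.Chars.startswith, List.isPrefixOf_iff_prefix] using hp
  cases hb : PySem.Chars.startswith l q with
  | false => rfl
  | true =>
    have hq' : q <+: l := by
      simpa [PySem.Chars.startswith, List.isPrefixOf_iff_prefix] using hb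
    rcases le_total p.length q.length with hle | hle
    · exact absurd (List.prefix_of_prefix_length_le hp' hq' hle) hpq
    · exact absurd (List.prefix_of_prefix_length_le hq' hp' hle) hqp

theorem pv_theme_not_editorbr (l : List Char)
    (h : (PySem.Chars.startswith l ['[', 't', 'h', 'e', 'm', 'e'] = true ∨
          PySem.Chars.startswith l ['[', 's', 't', 'a', 't', 'u', 's', 'l', 'i', 'n', 'e'] = true) ∨
         PySem.Chars.startswith l
           ['[', 'e', 'd', 'i', 't', 'o', 'r', '.', 's', 't', 'a', 't', 'u', 's', 'l', 'i', 'n', 'e'] = true) :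
    PySem.Chars.startswith l ['[', 'e', 'd', 'i', 't', 'o', 'r', ']'] = false := by
  rcases h with (h1 | h2) | h3
  · exact pv_chars_excl l _ _ h1 (by decide) (by decide)
  · exact pv_chars_excl l _ _ h2 (by decide) (by decide)
  · exact pv_chars_excl l _ _ h3 (by decide) (by decide)

theorem pv_editordot_not_editorbr (l : List Char)
    (h : PySem.Chars.startswith l ['[', 'e', 'd', 'i', 't', 'o', 'r', '.'] = true) :
    PySem.Chars.startswith l ['[', 'e', 'd', 'i', 't', 'o', 'r', ']'] = false :=
  pv_chars_excl l _ _ h (by decide) (by decide)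

theorem pv_step_eq (u : List String) (e t : PySem.Dict String String) (k : List String)
    (ls : Option String) (b : String) :
    pvStepA (u, e, t, k, ls) b =
      (u ++ (if pvKindB b == "plain" then [b] else []),
       (if pvKindB b == "editor" then e.insert (pvNameB b) b else e),
       (if pvKindB b == "theme" then t.insert (pvNameB b) b else t),
       k ++ (if pvKindB b == "keys" then [b] else []),
       (if pvKindB b == "theme" then some "theme"
        else if pvKindB b == "editor" then some "editor" else none)) := by
  simp only [pvStepA, pvKindB, pvNameB, pv_is_keybinding_block]
  split_ifs <;> simp_all [pv_theme_not_editorbr, pv_editordot_not_editorbr]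

theorem pv_fold_plain (blocks : List String) :
    ∀ (u : List String) (e t : PySem.Dict String String) (k : List String) (ls : Option String),
      (blocks.foldl pvStepA (u, e, t, k, ls)).1
        = u ++ blocks.filter (fun b => pvKindB b == "plain") := by
  induction blocks with
  | nil => intro u e t k ls; simp
  | cons b bs ih =>
    intro u e t k ls
    rw [List.foldl_cons, pv_step_eq, List.filter_cons]
    by_cases hb : (pvKindB b == "plain") = true <;> simp [hb, ih]

theorem pv_fold_keys (blocks : List String) :
    ∀ (u : List String) (e t : PySem.Dict String String) (k : List String) (ls : Option String),
      (blocks.foldl pvStepA (u, e, t, k, ls)).2.2.2.1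
        = k ++ blocks.filter (fun b => pvKindB b == "keys") := by
  induction blocks with
  | nil => intro u e t k ls; simp
  | cons b bs ih =>
    intro u e t k ls
    rw [List.foldl_cons, pv_step_eq, List.filter_cons]
    by_cases hb : (pvKindB b == "keys") = true <;> simp [hb, ih]

theorem pv_fold_editor (blocks : List String) :
    ∀ (u : List String) (e t : PySem.Dict String String) (k : List String) (ls : Option String),
      (blocks.foldl pvStepA (u, e, t, k, ls)).2.1
        = (blocks.filter (fun b => pvKindB b == "editor")).foldl
            (fun d b => d.insert (pvNameB b) b) e := by
  induction blocks with
  | nil => intro u e t k ls; simp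
  | cons b bs ih =>
    intro u e t k ls
    rw [List.foldl_cons, pv_step_eq, List.filter_cons]
    by_cases hb : (pvKindB b == "editor") = true <;> simp [hb, ih]

theorem pv_fold_theme (blocks : List String) :
    ∀ (u : List String) (e t : PySem.Dict String String) (k : List String) (ls : Option String),
      (blocks.foldl pvStepA (u, e, t, k, ls)).2.2.1
        = (blocks.filter (fun b => pvKindB b == "theme")).foldl
            (fun d b => d.insert (pvNameB b) b) t := by
  induction blocks with
  | nil => intro u e t k ls; simp
  | cons b bs ih =>
    intro u e t k ls
    rw [List.foldl_cons, pv_step_eq, List.filter_cons]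
    by_cases hb : (pvKindB b == "theme") = true <;> simp [hb, ih]

set_option maxRecDepth 8192 in
theorem pv_banner_editor : pvBanner "Editor Configuration" = pvBannerEditorA := by decide
set_option maxRecDepth 8192 in
theorem pv_banner_theme : pvBanner "Theme & UI" = pvBannerThemeA := by decide
set_option maxRecDepth 8192 in
theorem pv_banner_keys : pvBanner "Key Bindings" = pvBannerKeysA := by decide

theorem pv_sorted_map_isEmpty (d : PySem.Dict String String) :
    ((PySem.List.sorted d.keys (fun x => x) false).map (fun k => d.getD k "")).isEmpty
      = d.items.isEmpty := by
  rcases h : PySem.List.sorted d.keys (fun x => x) false with _ | ⟨x, xs⟩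
  · rw [PySem.List.sorted_eq_nil_iff] at h
    simp only [PySem.Dict.keys, List.map_eq_nil_iff] at h
    simp [h]
  · have : d.keys ≠ [] := by
      intro hk
      rw [hk] at h
      simp [PySem.List.sorted] at h
    simp only [PySem.Dict.keys] at this
    rcases hi : d.items with _ | _
    · simp [hi] at this
    · simp

theorem pv_nl_toList : ("\n" : String).toList = ['\n'] := by decide
theorem pv_nlnl_toList : ("\n\n" : String).toList = ['\n', '\n'] := by decide

theorem pv_assemble (U K : List String) (e t : PySem.Dict String String) :
    (let parts : List String :=
       if U.isEmpty then [] else [PySem.Str.join "\n\n" U];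
     let parts :=
       if e.items.isEmpty then parts else
         (if parts.isEmpty then parts else parts ++ [""]) ++
         [pvBannerEditorA,
          PySem.Str.join "\n\n" ((PySem.List.sorted e.keys (fun x => x) false).map
            (fun key => e.getD key ""))];
     let parts :=
       if t.items.isEmpty then parts else
         (if parts.isEmpty then parts else parts ++ [""]) ++
         [pvBannerThemeA,
          PySem.Str.join "\n\n" ((PySem.List.sorted t.keys (fun x => x) false).map
            (fun key => t.getD key ""))];
     let parts :=
       if K.isEmpty then parts else
         (if parts.isEmpty then parts else parts ++ [""]) ++
         [pvBannerKeysA, PySem.Str.join "\n\n" K];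
     PySem.Str.join "\n" parts ++ "\n")
    =
    PySem.Str.join "\n\n"
      (([ pvRenderB none U,
          pvRenderB (some "Editor Configuration")
            ((PySem.List.sorted e.keys (fun x => x) false).map (fun k => e.getD k "")),
          pvRenderB (some "Theme & UI")
            ((PySem.List.sorted t.keys (fun x => x) false).map (fun k => t.getD k "")),
          pvRenderB (some "Key Bindings") K ] : List (Option String)).filterMap id) ++ "\n" := by
  simp only [pvRenderB, pv_sorted_map_isEmpty, pv_banner_editor, pv_banner_theme, pv_banner_keys]
  by_cases hU : U.isEmpty <;> by_cases hE : e.items.isEmpty <;>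
    by_cases hT : t.items.isEmpty <;> by_cases hK : K.isEmpty <;>
      · simp only [hU, hE, hT, hK, if_true, if_false, List.filterMap,
          List.isEmpty_nil, List.isEmpty_cons, List.nil_append,
          Bool.false_eq_true, List.cons_append, id]
        rw [← String.toList_inj]
        simp [PySem.Str.toList_join, PySem.Chars.join, List.intercalate, List.intersperse,
          String.toList_append, pv_nl_toList, pv_nlnl_toList, List.append_assoc]

-- ===== VERDICT (by name: the statement is the Claim_ definition above) =====
theorem process_config_toml_spec : Claim_equal_process_config_toml := by
  intro blocks _hdom _hpre
  unfold Spec_process_config_toml process_config_toml process_config_toml_alt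
  rcases hr : blocks.foldl pvStepA ([], PySem.Dict.empty, PySem.Dict.empty, [], none)
    with ⟨u, e, t, k, ls⟩
  have hu : u = blocks.filter (fun b => pvKindB b == "plain") := by
    have h := pv_fold_plain blocks [] PySem.Dict.empty PySem.Dict.empty [] none
    rw [hr] at h; simpa using h
  have he : e = (blocks.filter (fun b => pvKindB b == "editor")).foldl
      (fun d b => d.insert (pvNameB b) b) PySem.Dict.empty := by
    have h := pv_fold_editor blocks [] PySem.Dict.empty PySem.Dict.empty [] none
    rw [hr] at h; simpa using h
  have ht : t = (blocks.filter (fun b => pvKindB b == "theme")).foldl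
      (fun d b => d.insert (pvNameB b) b) PySem.Dict.empty := by
    have h := pv_fold_theme blocks [] PySem.Dict.empty PySem.Dict.empty [] none
    rw [hr] at h; simpa using h
  have hk : k = blocks.filter (fun b => pvKindB b == "keys") := by
    have h := pv_fold_keys blocks [] PySem.Dict.empty PySem.Dict.empty [] none
    rw [hr] at h; simpa using h
  subst hu he ht hk
  exact pv_assemble _ _ _ _
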